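-- pv_equiv track=rewrite | github.com/KiritoFD/Latent_Style | Cycle-NCE/plot-swd.py | build_patch_combinations
-- ===== SOURCE A (Python) =====
-- import itertools
-- from typing import Dict, List, Tuple, Optional
--
-- def build_patch_combinations(patch_sizes: List[int], max_combo_size: int = 0) -> List[Tuple[int, ...]]:
--     """
--     Build all unique patch-size combinations with size >= 2.
--     max_combo_size <= 0 means no cap.
--     """
--     uniq = sorted(set(int(p) for p in patch_sizes))
--     if len(uniq) < 2:
--         return []
--     upper = len(uniq) if max_combo_size <= 0 else min(len(uniq), int(max_combo_size))
--     combos: List[Tuple[int, ...]] = []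
--     for r in range(2, upper + 1):
--         combos.extend(list(itertools.combinations(uniq, r)))
--     return combos
-- ===== SOURCE B (Python) =====
-- def build_patch_combinations(patch_sizes, max_combo_size=0):
--     """
--     Build all unique patch-size combinations with size >= 2.
--     max_combo_size <= 0 means no cap.
--     Recursive backtracking over the remaining suffix instead of itertools.
--     """
--     uniq = sorted({int(p) for p in patch_sizes})
--     if len(uniq) < 2:
--         return []
--     upper = len(uniq) if max_combo_size <= 0 else min(len(uniq), int(max_combo_size))
--     out = []
--
--     def _bt(r, rest, partial):
--         if len(partial) == r:
--             out.append(tuple(partial))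
--             return
--         for j in range(len(rest)):
--             _bt(r, rest[j + 1:], partial + [rest[j]])
--
--     for r in range(2, upper + 1):
--         _bt(r, uniq, [])
--     return out
-- ===== Notes on version B (the rewrite author's own statement) =====
-- stated objective: alternative
-- what changed: Replaces itertools.combinations with an explicit recursive backtracking helper that builds each combination incrementally over the remaining suffix of the sorted unique sizes, producing the same r-ascending lexicographic order.
import Mathlib
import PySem

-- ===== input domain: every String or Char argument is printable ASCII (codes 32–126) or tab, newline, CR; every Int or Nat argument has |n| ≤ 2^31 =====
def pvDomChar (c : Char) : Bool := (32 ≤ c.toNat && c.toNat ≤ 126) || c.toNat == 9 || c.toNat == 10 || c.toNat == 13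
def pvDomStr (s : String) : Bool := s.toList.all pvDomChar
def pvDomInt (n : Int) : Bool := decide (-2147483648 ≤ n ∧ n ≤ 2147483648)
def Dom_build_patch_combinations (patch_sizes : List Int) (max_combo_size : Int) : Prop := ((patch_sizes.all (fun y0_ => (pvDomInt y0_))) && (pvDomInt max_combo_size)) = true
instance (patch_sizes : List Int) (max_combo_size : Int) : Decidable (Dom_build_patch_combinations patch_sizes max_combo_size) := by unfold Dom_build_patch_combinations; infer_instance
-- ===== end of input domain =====

-- B replaces itertools.combinations with an explicit recursive backtracking helper (same order, same cost): an alternative decomposition.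


-- ===== PORT A =====
-- itertools.combinations(xs, r) in its documented order (r ascending done by the caller;
-- within one r: combinations containing the first element first) ported by hand, step for step.
def pvCombos : List Int → Nat → List (List Int)
  | _, 0 => [[]]
  | [], _ + 1 => []
  | x :: xs, r + 1 => ((pvCombos xs r).map (fun c => x :: c)) ++ pvCombos xs (r + 1)

def build_patch_combinations (patch_sizes : List Int) (max_combo_size : Int) : List (List Int) :=
  let uniq := PySem.List.sorted (PySem.Set.ofList patch_sizes) (fun x => x) false
  if uniq.length < 2 then []
  else
    let upper : Int := if max_combo_size ≤ 0 then (uniq.length : Int) else min (uniq.length : Int) max_combo_size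
    (PySem.List.pyRange 2 (upper + 1) 1).foldl (fun combos r => combos ++ pvCombos uniq r.toNat) []

-- ===== PORT B =====
-- Source B's _bt: the for-loop over j (recursing on rest[j+1:]) is the structural recursion on rest:
-- the 'else' continuation 'pvBt r xs part …' re-enters with part.length ≠ r and iterates the tail.
def pvBt (r : Nat) (rest : List Int) (part : List Int) (out : List (List Int)) : List (List Int) :=
  if part.length = r then out ++ [part]
  else
    match rest with
    | [] => out
    | x :: xs => pvBt r xs part (pvBt r xs (part ++ [x]) out)

def build_patch_combinations_alt (patch_sizes : List Int) (max_combo_size : Int) : List (List Int) :=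
  let uniq := PySem.List.sorted (PySem.Set.ofList patch_sizes) (fun x => x) false
  if uniq.length < 2 then []
  else
    let upper : Int := if max_combo_size ≤ 0 then (uniq.length : Int) else min (uniq.length : Int) max_combo_size
    (PySem.List.pyRange 2 (upper + 1) 1).foldl (fun out r => pvBt r.toNat uniq [] out) []


-- ===== PRECONDITION & SPEC =====
def Spec_build_patch_combinations (patch_sizes : List Int) (max_combo_size : Int) (out : List (List Int)) : Prop := out = build_patch_combinations_alt patch_sizes max_combo_size
instance (patch_sizes : List Int) (max_combo_size : Int) (out : List (List Int)) : Decidable (Spec_build_patch_combinations patch_sizes max_combo_size out) := by unfold Spec_build_patch_combinations; infer_instance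

-- ===== CLAIM (what is proved, stated in full; the proofs are below) =====
def Claim_equal_build_patch_combinations : Prop := ∀ (patch_sizes : List Int) (max_combo_size : Int), Dom_build_patch_combinations patch_sizes max_combo_size → Spec_build_patch_combinations patch_sizes max_combo_size (build_patch_combinations patch_sizes max_combo_size)

-- ===== LEMMAS AND PROOFS =====
-- backtracking invariant: pvBt appends, to out, the combinations of the right size
-- drawn from rest, each prefixed by the partial tuple built so far
lemma pvBt_eq (rest : List Int) : ∀ (part : List Int) (out : List (List Int)) (r : Nat),
    part.length ≤ r →
    pvBt r rest part out = out ++ (pvCombos rest (r - part.length)).map (fun c => part ++ c) := by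
  induction rest with
  | nil =>
    intro part out r h
    unfold pvBt
    rcases Nat.lt_or_eq_of_le h with hlt | heq
    · simp [Nat.ne_of_lt hlt]
      match hk : r - part.length, Nat.sub_ne_zero_of_lt hlt with
      | k + 1, _ => simp [pvCombos]
    · simp [heq, pvCombos]
  | cons x xs ih =>
    intro part out r h
    unfold pvBt
    rcases Nat.lt_or_eq_of_le h with hlt | heq
    · simp only [Nat.ne_of_lt hlt, if_false]
      have h1 : (part ++ [x]).length ≤ r := by simp; omega
      rw [ih (part ++ [x]) out r h1, ih part _ r h]
      match hk : r - part.length, Nat.sub_ne_zero_of_lt hlt with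
      | k + 1, _ =>
        have hk' : r - (part.length + 1) = k := by omega
        simp [hk', pvCombos, List.map_map, Function.comp_def]
    · simp [heq, pvCombos]


-- ===== VERDICT (by name: the statement is the Claim_ definition above) =====
theorem build_patch_combinations_spec : Claim_equal_build_patch_combinations := by
  intro patch_sizes max_combo_size _
  unfold Spec_build_patch_combinations build_patch_combinations build_patch_combinations_alt
  by_cases h : (PySem.List.sorted (PySem.Set.ofList patch_sizes) (fun x => x) false).length < 2
  · rw [if_pos h, if_pos h]
  · simp only [h, if_false]
    have hfun :
        (fun (combos : List (List Int)) (r : Int) =>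
            combos ++ pvCombos (PySem.List.sorted (PySem.Set.ofList patch_sizes) (fun x => x) false) r.toNat)
          = (fun (out : List (List Int)) (r : Int) =>
            pvBt r.toNat (PySem.List.sorted (PySem.Set.ofList patch_sizes) (fun x => x) false) [] out) := by
      funext out r
      rw [pvBt_eq _ [] out r.toNat (Nat.zero_le _)]
      simp
    rw [hfun]
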